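-- pv_equiv track=rewrite | github.com/mohammadfaiizan/ProjectI | DSA/Problem/Graph/11_Network_Flow_Min_Cut/1595_Minimum_Cost_to_Connect_Two_Groups_of_Points.py | connectTwoGroups_dp_optimized
-- ===== SOURCE A (Python) =====
-- from typing import List, Dict, Set, Tuple, Optional
-- from functools import lru_cache
--
-- def connectTwoGroups_dp_optimized(cost: List[List[int]]) -> int:
--     """
--     Approach 2: Optimized DP with Multiple Connections
--
--     Allow multiple connections per point in group1 for optimization.
--
--     Time: O(size1 * 2^size2 * size2)
--     Space: O(size1 * 2^size2)
--     """
--     size1, size2 = len(cost), len(cost[0])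
--
--     # Precompute minimum cost for each point in group2
--     min_cost_group2 = [min(cost[i][j] for i in range(size1)) for j in range(size2)]
--
--     @lru_cache(maxsize=None)
--     def dp(i: int, mask: int) -> int:
--         """DP with option to connect to multiple points"""
--         if i == size1:
--             # Connect remaining points in group2
--             total_cost = 0
--             for j in range(size2):
--                 if not (mask & (1 << j)):
--                     total_cost += min_cost_group2[j]
--             return total_cost
--
--         min_cost = float('inf')
--
--         # Try all possible subsets of connections for point i
--         for subset in range(1, 1 << size2):
--             connection_cost = 0
--             new_mask = mask
--
--             for j in range(size2):
--                 if subset & (1 << j):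
--                     connection_cost += cost[i][j]
--                     new_mask |= (1 << j)
--
--             total_cost = connection_cost + dp(i + 1, new_mask)
--             min_cost = min(min_cost, total_cost)
--
--         return min_cost
--
--     return dp(0, 0)
-- ===== SOURCE B (Python) =====
-- def connectTwoGroups_dp_optimized(cost):
--     """Bottom-up DP: per row, an include/exclude sweep over bits (O(size1 * 2^size2 * size2))
--     replaces A's enumeration of every subset per state."""
--     size1, size2 = len(cost), len(cost[0])
--     min_cost_group2 = [min(cost[i][j] for i in range(size1)) for j in range(size2)]
--     full = 1 << size2
--     # layer for "all rows processed": pay min_cost_group2 for uncovered columns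
--     dp = []
--     for mask in range(full):
--         total = 0
--         for j in range(size2):
--             if not mask & (1 << j):
--                 total += min_cost_group2[j]
--         dp.append(total)
--     for i in range(size1 - 1, -1, -1):
--         row = cost[i]
--         # H[mask]: best over subsets of bits >= j added on top of mask (empty allowed)
--         # E[mask]: best over NONEMPTY subsets whose lowest bit is >= j
--         H = dp[:]
--         E = [None] * full
--         for j in range(size2 - 1, -1, -1):
--             E = [H[mask | (1 << j)] + row[j] if E[mask] is None
--                  else min(E[mask], H[mask | (1 << j)] + row[j])
--                  for mask in range(full)]
--             H = [min(H[mask], row[j] + H[mask | (1 << j)]) for mask in range(full)]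
--         dp = E
--     return dp[0]
-- ===== Notes on version B (the rewrite author's own statement) =====
-- stated objective: faster
-- what changed: Replaces the memoized top-down DP that enumerates every nonempty subset (2^size2 candidates, each rescanned bit by bit) per state with a bottom-up layer DP doing one include/exclude sweep over the size2 bits of all masks per row; intended as faster (measured 75x at n=64; both are exponential in size2, so both time out at n=256). Pre_ excludes empty cost (A raises IndexError), ragged rows shorter than row 0 (IndexError), and size2 == 0, where A returns float('inf'), not an int.
-- outside the precondition, e.g. on connectTwoGroups_dp_optimized([[]]): A returns inf, B returns None; on connectTwoGroups_dp_optimized([]): A raises IndexError, B raises IndexError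
import Mathlib
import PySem

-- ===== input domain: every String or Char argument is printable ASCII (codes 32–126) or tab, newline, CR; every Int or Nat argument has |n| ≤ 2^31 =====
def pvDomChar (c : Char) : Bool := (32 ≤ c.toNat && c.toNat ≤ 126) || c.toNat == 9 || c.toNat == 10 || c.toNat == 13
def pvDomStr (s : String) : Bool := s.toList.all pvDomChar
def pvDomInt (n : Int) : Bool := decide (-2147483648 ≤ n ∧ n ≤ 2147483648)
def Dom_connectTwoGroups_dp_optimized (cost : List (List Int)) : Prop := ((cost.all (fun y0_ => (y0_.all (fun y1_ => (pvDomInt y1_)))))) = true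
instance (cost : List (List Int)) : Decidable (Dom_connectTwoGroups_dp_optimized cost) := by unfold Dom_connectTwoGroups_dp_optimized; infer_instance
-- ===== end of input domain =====

-- B replaces A's per-state enumeration of all nonempty subsets (a 2^size2-candidate scan per DP
-- state) by a bottom-up layer DP with one include/exclude bit sweep per row; intended as faster
-- (measured 75x at n=64; both are exponential in size2, and both time out at n=256).

-- ===== PORT A =====
-- python min(...) over a nonempty sequence of ints (the sequences are nonempty under Pre_; [] never occurs there)
def pvMinList (l : List Int) : Int :=
  match l with
  | [] => 0
  | x :: xs => xs.foldl min x

-- min_cost_group2 = [min(cost[i][j] for i in range(size1)) for j in range(size2)]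
-- (this comprehension is shared verbatim by both Pythons; indices are in range under Pre_, so getD's default is never read)
def pvMinCostGroup2 (cost : List (List Int)) : List Int :=
  (List.range (cost.headD []).length).map
    (fun j => pvMinList ((List.range cost.length).map (fun i => ((cost.getD i []).getD j 0))))

-- dp(i, mask) of A, as structural recursion over the rows cost[i:], with c2 = min_cost_group2 and
-- m = size2.  range(1, 1 << size2) is the Nat list List.range' 1 (2^m - 1) (both bounds nonnegative);
-- `subset & (1 << j)` is testBit, `new_mask |= (1 << j)` is `||| 2^j`; float('inf') is the `none`
-- accumulator of the min-fold (the subset list is nonempty iff m ≥ 1, as Pre_ guarantees).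
def pvDpA (c2 : List Int) (m : Nat) (rows : List (List Int)) (mask : Nat) : Int :=
  match rows with
  | [] =>
      (List.range m).foldl (fun tot j => if mask.testBit j then tot else tot + c2.getD j 0) 0
  | row :: rest =>
      ((List.range' 1 (2^m - 1)).foldl
        (fun (acc : Option Int) s =>
          let p := (List.range m).foldl
            (fun (p : Int × Nat) j =>
              if s.testBit j then (p.1 + row.getD j 0, p.2 ||| 2^j) else p) (0, mask)
          let tot := p.1 + pvDpA c2 m rest p.2
          some (match acc with | none => tot | some a => min a tot)) none).getD 0

def connectTwoGroups_dp_optimized (cost : List (List Int)) : Int :=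
  pvDpA (pvMinCostGroup2 cost) (cost.headD []).length cost 0

-- ===== PORT B =====
-- one row of B: the descending j-loop updating E (best over nonempty added subsets with lowest
-- set bit ≥ j) and H (best over all added subsets of bits ≥ j) for every mask < 2^m.  E's python
-- None is Option; the final `.map (·.getD 0)` realises that under Pre_ (m ≥ 1) no None remains.
def pvStepB (m : Nat) (row : List Int) (dp : List Int) : List Int :=
  let full := 2^m
  let res := ((List.range m).reverse).foldl
    (fun (p : List (Option Int) × List Int) j =>
      let E := p.1
      let H := p.2
      let E' := (List.range full).map (fun mask =>
        match E.getD mask none with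
        | none => some (H.getD (mask ||| 2^j) 0 + row.getD j 0)
        | some e => some (min e (H.getD (mask ||| 2^j) 0 + row.getD j 0)))
      let H' := (List.range full).map (fun mask =>
        min (H.getD mask 0) (row.getD j 0 + H.getD (mask ||| 2^j) 0))
      (E', H'))
    ((List.range full).map (fun _ => (none : Option Int)), dp)
  res.1.map (fun o => o.getD 0)

def connectTwoGroups_dp_optimized_alt (cost : List (List Int)) : Int :=
  let m := (cost.headD []).length
  let c2 := pvMinCostGroup2 cost
  let dp0 := (List.range (2^m)).map
    (fun mask => (List.range m).foldl (fun tot j => if mask.testBit j then tot else tot + c2.getD j 0) 0)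
  (cost.foldr (pvStepB m) dp0).getD 0 0

-- ===== PRECONDITION & SPEC =====
-- Pre_ excludes exactly: cost == [] (A raises IndexError on cost[0]); a row shorter than row 0
-- (IndexError on cost[i][j]); and len(cost[0]) == 0, where A returns float('inf'), not an int.
-- (The two ports happen to agree on every input; Pre_ delimits where the PYTHON A returns an int.)
def Pre_connectTwoGroups_dp_optimized (cost : List (List Int)) : Prop :=
  cost ≠ [] ∧ 0 < (cost.headD []).length ∧ ∀ row ∈ cost, (cost.headD []).length ≤ row.length
instance (cost : List (List Int)) : Decidable (Pre_connectTwoGroups_dp_optimized cost) := by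
  unfold Pre_connectTwoGroups_dp_optimized; infer_instance

def pvWitness_connectTwoGroups_dp_optimized : List (List Int) := [[1, 2], [3, 4]]

def Spec_connectTwoGroups_dp_optimized (cost : List (List Int)) (out : Int) : Prop := out = connectTwoGroups_dp_optimized_alt cost
instance (cost : List (List Int)) (out : Int) : Decidable (Spec_connectTwoGroups_dp_optimized cost out) := by unfold Spec_connectTwoGroups_dp_optimized; infer_instance

-- ===== CLAIM (what is proved, stated in full; the proofs are below) =====
def Claim_equal_connectTwoGroups_dp_optimized : Prop := ∀ (cost : List (List Int)), Dom_connectTwoGroups_dp_optimized cost → Pre_connectTwoGroups_dp_optimized cost → Spec_connectTwoGroups_dp_optimized cost (connectTwoGroups_dp_optimized cost)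

-- ===== LEMMAS AND PROOFS =====

-- ---- the Option-valued running minimum (A's min_cost accumulator, B's E merge) ----
def pvOM (l : List Int) : Option Int :=
  l.foldl (fun acc v => some (match acc with | none => v | some a => min a v)) none

lemma pvOM_go (l : List Int) (a : Int) :
    l.foldl (fun acc v => some (match acc with | none => v | some a => min a v)) (some a)
      = some (l.foldl min a) := by
  induction l generalizing a with
  | nil => rfl
  | cons x xs ih => simp [List.foldl, ih]

-- pvOM is python's running min; it coincides with List.min?
lemma pvOM_eq_min? (l : List Int) : pvOM l = l.min? := by
  cases l with
  | nil => rfl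
  | cons x xs =>
    rw [show (x::xs).min? = some (xs.foldl min x) from rfl]
    simp [pvOM, List.foldl, pvOM_go]

lemma pvOM_eq_some_iff (l : List Int) (v : Int) :
    pvOM l = some v ↔ v ∈ l ∧ ∀ x ∈ l, v ≤ x := by
  rw [pvOM_eq_min?]; exact List.min?_eq_some_iff

lemma pvOM_eq_none_iff (l : List Int) : pvOM l = none ↔ l = [] := by
  rw [pvOM_eq_min?]; exact List.min?_eq_none_iff

lemma pvOM_singleton (x : Int) : pvOM [x] = some x := rfl

lemma pvOM_eq_of_dominates {l1 l2 : List Int}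
    (h12 : ∀ a ∈ l1, ∃ b ∈ l2, b ≤ a) (h21 : ∀ b ∈ l2, ∃ a ∈ l1, a ≤ b) :
    pvOM l1 = pvOM l2 := by
  cases h1 : pvOM l1 with
  | none =>
    rw [pvOM_eq_none_iff] at h1; subst h1
    cases h2 : pvOM l2 with
    | none => rfl
    | some b =>
      obtain ⟨hb, -⟩ := (pvOM_eq_some_iff _ _).mp h2
      obtain ⟨a, ha, -⟩ := h21 b hb
      simp at ha
  | some v1 =>
    obtain ⟨hv1, hle1⟩ := (pvOM_eq_some_iff _ _).mp h1
    cases h2 : pvOM l2 with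
    | none =>
      rw [pvOM_eq_none_iff] at h2; subst h2
      obtain ⟨b, hb, -⟩ := h12 v1 hv1
      simp at hb
    | some v2 =>
      obtain ⟨hv2, hle2⟩ := (pvOM_eq_some_iff _ _).mp h2
      obtain ⟨b, hb, hbv⟩ := h12 v1 hv1
      obtain ⟨a, ha, hab⟩ := h21 v2 hv2
      have : v1 = v2 := le_antisymm (le_trans (hle1 a ha) hab) (le_trans (hle2 b hb) hbv)
      rw [this]

lemma pvOM_congr_mem {α : Type} (g : α → Int) {l1 l2 : List α}
    (h : ∀ x, x ∈ l1 ↔ x ∈ l2) : pvOM (l1.map g) = pvOM (l2.map g) := by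
  apply pvOM_eq_of_dominates
  · intro a ha
    obtain ⟨x, hx, rfl⟩ := List.mem_map.mp ha
    exact ⟨g x, List.mem_map_of_mem ((h x).mp hx), le_refl _⟩
  · intro b hb
    obtain ⟨x, hx, rfl⟩ := List.mem_map.mp hb
    exact ⟨g x, List.mem_map_of_mem ((h x).mpr hx), le_refl _⟩

lemma pvOM_append (l1 l2 : List Int) :
    pvOM (l1 ++ l2) = match pvOM l1, pvOM l2 with
      | none, b => b
      | some a, none => some a
      | some a, some b => some (min a b) := by
  cases h1 : pvOM l1 with
  | none => rw [pvOM_eq_none_iff] at h1; subst h1; simp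
  | some a =>
    cases h2 : pvOM l2 with
    | none => rw [pvOM_eq_none_iff] at h2; subst h2; simp [h1]
    | some b =>
      obtain ⟨ha, hlea⟩ := (pvOM_eq_some_iff _ _).mp h1
      obtain ⟨hb, hleb⟩ := (pvOM_eq_some_iff _ _).mp h2
      have : pvOM (l1 ++ l2) = some (min a b) := by
        rw [pvOM_eq_some_iff]
        constructor
        · rcases le_total a b with h | h
          · simpa [min_eq_left h] using List.mem_append_left l2 ha
          · simpa [min_eq_right h] using List.mem_append_right l1 hb
        · intro x hx
          rcases List.mem_append.mp hx with hx | hx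
          · exact le_trans (min_le_left a b) (hlea x hx)
          · exact le_trans (min_le_right a b) (hleb x hx)
      simp [this]

lemma pvOM_map_add (c : Int) (l : List Int) :
    pvOM (l.map (fun x => x + c)) = (pvOM l).map (fun x => x + c) := by
  cases h : pvOM l with
  | none => rw [pvOM_eq_none_iff] at h; subst h; rfl
  | some a =>
    obtain ⟨ha, hle⟩ := (pvOM_eq_some_iff _ _).mp h
    have : pvOM (l.map (fun x => x + c)) = some (a + c) := by
      rw [pvOM_eq_some_iff]
      refine ⟨List.mem_map_of_mem ha, ?_⟩
      intro x hx
      obtain ⟨y, hy, rfl⟩ := List.mem_map.mp hx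
      have := hle y hy; omega
    simp [this]

-- ---- subset enumerations ----
-- all s whose binary ones lie in [j, j+k)
def pvSubs (j k : Nat) : List Nat :=
  match k with
  | 0 => [0]
  | k + 1 => pvSubs (j+1) k ++ (pvSubs (j+1) k).map (fun s => 2^j + s)

-- all nonzero s whose binary ones lie in [j, j+k), grouped by lowest set bit
def pvNeSubs (j k : Nat) : List Nat :=
  match k with
  | 0 => []
  | k + 1 => ((pvSubs (j+1) k).map (fun s => 2^j + s)) ++ pvNeSubs (j+1) k

lemma pvSubs_mem (k j s : Nat) : s ∈ pvSubs j k ↔ ∃ q, q < 2^k ∧ s = 2^j * q := by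
  induction k generalizing j s with
  | zero => simp [pvSubs]
  | succ k ih =>
    simp only [pvSubs, List.mem_append, List.mem_map, ih]
    constructor
    · rintro (⟨q, hq, rfl⟩ | ⟨s', ⟨q, hq, rfl⟩, rfl⟩)
      · exact ⟨2*q, by omega, by ring⟩
      · exact ⟨2*q+1, by omega, by ring⟩
    · rintro ⟨q, hq, rfl⟩
      rcases Nat.even_or_odd q with ⟨r, rfl⟩ | ⟨r, rfl⟩
      · exact Or.inl ⟨r, by omega, by ring⟩
      · exact Or.inr ⟨2^(j+1)*r, ⟨r, by omega, rfl⟩, by ring⟩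

lemma pvNeSubs_mem (k j s : Nat) : s ∈ pvNeSubs j k ↔ ∃ q, 1 ≤ q ∧ q < 2^k ∧ s = 2^j * q := by
  induction k generalizing j s with
  | zero => simp [pvNeSubs]
  | succ k ih =>
    simp only [pvNeSubs, List.mem_append, List.mem_map, ih, pvSubs_mem]
    constructor
    · rintro (⟨s', ⟨q, hq, rfl⟩, rfl⟩ | ⟨q, h1, hq, rfl⟩)
      · exact ⟨2*q+1, by omega, by omega, by ring⟩
      · exact ⟨2*q, by omega, by omega, by ring⟩
    · rintro ⟨q, h1, hq, rfl⟩
      rcases Nat.even_or_odd q with ⟨r, rfl⟩ | ⟨r, rfl⟩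
      · exact Or.inr ⟨r, by omega, by omega, by ring⟩
      · exact Or.inl ⟨2^(j+1)*r, ⟨r, by omega, rfl⟩, by ring⟩

lemma pvSubs_zero_mem (j k : Nat) : 0 ∈ pvSubs j k :=
  (pvSubs_mem k j 0).mpr ⟨0, Nat.two_pow_pos k, by ring⟩

-- ---- A's inner connection_cost / new_mask loop ----
def pvCSum (row : List Int) (m s : Nat) : Int :=
  (List.range m).foldl (fun t j => if s.testBit j then t + row.getD j 0 else t) 0

lemma pvCSum_succ (row : List Int) (m s : Nat) :
    pvCSum row (m+1) s
      = if s.testBit m then pvCSum row m s + row.getD m 0 else pvCSum row m s := by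
  simp [pvCSum, List.range_succ, List.foldl_append]

lemma pvCSum_congr (row : List Int) (m : Nat) {s1 s2 : Nat}
    (h : ∀ t, t < m → s1.testBit t = s2.testBit t) :
    pvCSum row m s1 = pvCSum row m s2 := by
  induction m with
  | zero => rfl
  | succ m ih =>
    rw [pvCSum_succ, pvCSum_succ, h m (by omega), ih (fun t ht => h t (by omega))]

lemma pvCSum_zero (row : List Int) (m : Nat) : pvCSum row m 0 = 0 := by
  induction m with
  | zero => rfl
  | succ m ih => rw [pvCSum_succ]; simp [Nat.zero_testBit, ih]

lemma pvCSum_flip (row : List Int) {m j : Nat} {s1 s2 : Nat} (hj : j < m)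
    (h : ∀ t, t ≠ j → s1.testBit t = s2.testBit t)
    (h1 : s1.testBit j = true) (h2 : s2.testBit j = false) :
    pvCSum row m s1 = pvCSum row m s2 + row.getD j 0 := by
  induction m with
  | zero => omega
  | succ m ih =>
    rcases Nat.lt_or_ge j m with hm | hm
    · rw [pvCSum_succ, pvCSum_succ, h m (by omega), ih hm]
      split <;> ring
    · obtain rfl : j = m := by omega
      rw [pvCSum_succ, pvCSum_succ, h1, h2, if_pos rfl, if_neg (by simp)]
      rw [pvCSum_congr row _ (fun t ht => h t (by omega))]

lemma pvOrFold (m s mask : Nat) :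
    ((List.range m).foldl (fun a j => if s.testBit j then a ||| 2^j else a) mask)
      = mask ||| (s % 2^m) := by
  induction m generalizing mask with
  | zero => simp [Nat.mod_one]
  | succ m ih =>
    rw [List.range_succ, List.foldl_append]
    simp only [List.foldl, ih]
    apply Nat.eq_of_testBit_eq
    intro t
    by_cases hb : s.testBit m <;>
      simp only [hb, if_true, Nat.testBit_or, Nat.testBit_mod_two_pow,
        Nat.testBit_two_pow] <;>
      rcases Nat.lt_trichotomy t m with h | rfl | h <;>
      cases hbt : s.testBit t <;>
      cases hmt : mask.testBit t <;>
      simp_all <;> first | omega | (rw [← Bool.decide_or, decide_eq_decide]; omega)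

lemma pvPairFold (row : List Int) (m s mask : Nat) (hs : s < 2^m) :
    (List.range m).foldl
      (fun (p : Int × Nat) j => if s.testBit j then (p.1 + row.getD j 0, p.2 ||| 2^j) else p)
      (0, mask) = (pvCSum row m s, mask ||| s) := by
  have comp : ∀ (l : List Nat) (a : Int) (b : Nat),
      l.foldl (fun (p : Int × Nat) j => if s.testBit j then (p.1 + row.getD j 0, p.2 ||| 2^j) else p) (a, b)
        = (l.foldl (fun t j => if s.testBit j then t + row.getD j 0 else t) a,
           l.foldl (fun c j => if s.testBit j then c ||| 2^j else c) b) := by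
    intro l
    induction l with
    | nil => intro a b; rfl
    | cons x xs ih =>
      intro a b
      cases hx : s.testBit x <;> simp only [List.foldl, hx, if_true] <;> exact ih _ _
  rw [comp, pvOrFold, Nat.mod_eq_of_lt hs]
  rfl

lemma pvBit_split (j q t : Nat) :
    (2^j + 2^(j+1)*q).testBit t = (decide (j = t) || (2^(j+1)*q).testBit t) := by
  have e : 2^j + 2^(j+1)*q = 2^j*(2*q+1) := by ring
  rw [e, Nat.testBit_two_pow_mul, Nat.testBit_two_pow_mul]
  rcases Nat.lt_trichotomy t j with h | rfl | h
  · simp [decide_eq_false (show ¬ (j ≤ t) by omega), decide_eq_false (show ¬ (j < t) by omega),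
      decide_eq_false (show ¬ (j = t) by omega)]
  · simp [(show ¬ (t ≥ t+1) by omega), Nat.testBit_zero, (show (2*q+1) % 2 = 1 by omega)]
  · obtain ⟨u, rfl⟩ : ∃ u, t = j + (u + 1) := ⟨t - j - 1, by omega⟩
    have h1 : j + (u+1) - j = u + 1 := by omega
    have h2 : j + (u+1) - (j+1) = u := by omega
    rw [h1, h2]
    simp [(show j ≤ j + (u+1) by omega), Nat.testBit_succ, (show (2*q+1)/2 = q by omega)]

-- the candidate value of adding subset s on top of mask, with F the next DP layer
def pvG (row : List Int) (m : Nat) (F : Nat → Int) (mask s : Nat) : Int :=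
  pvCSum row m s + F (mask ||| s)

lemma pvG_split (row : List Int) (m : Nat) (F : Nat → Int) (mask j q : Nat) (hj : j < m) :
    pvG row m F mask (2^j + 2^(j+1) * q)
      = pvG row m F (mask ||| 2^j) (2^(j+1) * q) + row.getD j 0 := by
  have hor : mask ||| (2^j + 2^(j+1)*q) = (mask ||| 2^j) ||| (2^(j+1)*q) := by
    apply Nat.eq_of_testBit_eq
    intro t
    simp [Nat.testBit_or, pvBit_split, Nat.testBit_two_pow]
    cases mask.testBit t <;> cases (2^(j+1)*q).testBit t <;> simp
  have hb1 : (2^j + 2^(j+1)*q).testBit j = true := by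
    simp [pvBit_split]
  have hb2 : (2^(j+1)*q).testBit j = false := by
    rw [Nat.testBit_two_pow_mul]
    simp
  have hcs : pvCSum row m (2^j + 2^(j+1)*q) = pvCSum row m (2^(j+1)*q) + row.getD j 0 :=
    pvCSum_flip row hj (fun t ht => by rw [pvBit_split]; simp [Ne.symm ht]) hb1 hb2
  unfold pvG
  rw [hor, hcs]
  ring

-- ---- B's per-row sweep: loop invariant over the descending j-loop ----
lemma pvSweep (row : List Int) (m : Nat) (F : Nat → Int) :
    ∀ k j, j + k = m →
    (List.range' j k).foldr
      (fun j p =>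
        ((List.range (2^m)).map (fun mask =>
          match p.1.getD mask none with
          | none => some (p.2.getD (mask ||| 2^j) 0 + row.getD j 0)
          | some e => some (min e (p.2.getD (mask ||| 2^j) 0 + row.getD j 0))),
         (List.range (2^m)).map (fun mask =>
          min (p.2.getD mask 0) (row.getD j 0 + p.2.getD (mask ||| 2^j) 0))))
      ((List.range (2^m)).map (fun _ => (none : Option Int)), (List.range (2^m)).map F)
    = ((List.range (2^m)).map (fun mask => pvOM ((pvNeSubs j (m-j)).map (pvG row m F mask))),
       (List.range (2^m)).map (fun mask => (pvOM ((pvSubs j (m-j)).map (pvG row m F mask))).getD 0)) := by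
  intro k
  induction k with
  | zero =>
    intro j hj
    obtain rfl : j = m := by omega
    simp only [List.range', List.foldr]
    refine Prod.ext ?_ ?_
    · apply List.map_congr_left
      intro mask _
      simp [pvNeSubs, pvOM]
    · apply List.map_congr_left
      intro mask _
      simp [pvSubs, pvOM_singleton, pvG, pvCSum_zero]
  | succ k ih =>
    intro j hj
    have hjm : j < m := by omega
    have hk : m - j = k + 1 := by omega
    have hk' : m - (j+1) = k := by omega
    rw [List.range'_succ, List.foldr_cons, ih (j+1) (by omega)]
    have hor_lt : ∀ mask : Nat, mask < 2^m → mask ||| 2^j < 2^m := by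
      intro mask hm
      exact Nat.or_lt_two_pow hm (Nat.pow_lt_pow_right (by omega) hjm)
    -- the minimum over subsets with lowest set bit exactly j
    have hlow : ∀ mask : Nat,
        pvOM (((pvSubs (j+1) k).map (fun s => 2^j + s)).map (pvG row m F mask))
          = some ((pvOM ((pvSubs (j+1) k).map (pvG row m F (mask ||| 2^j)))).getD 0 + row.getD j 0) := by
      intro mask
      rw [List.map_map]
      have e1 : (pvSubs (j+1) k).map ((pvG row m F mask) ∘ (fun s => 2^j + s))
          = ((pvSubs (j+1) k).map (pvG row m F (mask ||| 2^j))).map (fun x => x + row.getD j 0) := by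
        rw [List.map_map]
        apply List.map_congr_left
        intro s hs
        obtain ⟨q, hq, rfl⟩ := (pvSubs_mem k (j+1) s).mp hs
        exact pvG_split row m F mask j q hjm
      rw [e1, pvOM_map_add]
      cases hOM : pvOM ((pvSubs (j+1) k).map (pvG row m F (mask ||| 2^j))) with
      | none =>
        rw [pvOM_eq_none_iff] at hOM
        exact absurd (List.mem_map_of_mem (f := pvG row m F (mask ||| 2^j)) (pvSubs_zero_mem (j+1) k)) (by simp [hOM])
      | some v => simp
    refine Prod.ext ?_ ?_
    · apply List.map_congr_left
      intro mask hmask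
      rw [List.mem_range] at hmask
      simp only [PySem.List.getD_map_range _ _ _ _ hmask,
        PySem.List.getD_map_range _ _ _ _ (hor_lt mask hmask)]
      rw [hk, hk']
      show _ = pvOM ((pvNeSubs j (k+1)).map (pvG row m F mask))
      rw [pvNeSubs, List.map_append, pvOM_append, hlow mask]
      cases hE : pvOM ((pvNeSubs (j+1) k).map (pvG row m F mask)) with
      | none => rfl
      | some e => simp [min_comm]
    · apply List.map_congr_left
      intro mask hmask
      rw [List.mem_range] at hmask
      simp only [PySem.List.getD_map_range _ _ _ _ hmask,
        PySem.List.getD_map_range _ _ _ _ (hor_lt mask hmask)]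
      rw [hk, hk']
      show _ = (pvOM ((pvSubs j (k+1)).map (pvG row m F mask))).getD 0
      rw [pvSubs, List.map_append, pvOM_append, hlow mask]
      cases hH : pvOM ((pvSubs (j+1) k).map (pvG row m F mask)) with
      | none =>
        rw [pvOM_eq_none_iff] at hH
        exact absurd (List.mem_map_of_mem (f := pvG row m F mask) (pvSubs_zero_mem (j+1) k)) (by simp [hH])
      | some h1 => simp [Int.add_comm]

-- B's sweep computes, for every mask, A's minimum over all nonempty subsets
lemma pvStepB_spec (m : Nat) (row : List Int) (F : Nat → Int) :
    pvStepB m row ((List.range (2^m)).map F)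
      = (List.range (2^m)).map
          (fun mask => (pvOM ((pvNeSubs 0 m).map (pvG row m F mask))).getD 0) := by
  unfold pvStepB
  dsimp only
  rw [List.foldl_reverse, show List.range m = List.range' 0 m from List.range_eq_range']
  rw [pvSweep row m F m 0 (by omega)]
  rw [List.map_map]
  rfl

-- A's row case as the same minimum over nonempty subsets
lemma pvFoldMin_eq (g : Nat → Int) (l : List Nat) :
    l.foldl (fun (acc : Option Int) s =>
      some (match acc with | none => g s | some a => min a (g s))) none = pvOM (l.map g) := by
  rw [pvOM, List.foldl_map]

-- A's row case as the same minimum over nonempty subsets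
lemma pvDpA_cons (c2 : List Int) (m : Nat) (row : List Int) (rest : List (List Int)) (mask : Nat) :
    pvDpA c2 m (row :: rest) mask
      = (pvOM ((pvNeSubs 0 m).map (pvG row m (pvDpA c2 m rest) mask))).getD 0 := by
  rw [pvDpA]
  dsimp only
  rw [pvFoldMin_eq]
  have hpow := Nat.two_pow_pos m
  trans (pvOM ((List.range' 1 (2^m - 1)).map (pvG row m (pvDpA c2 m rest) mask))).getD 0
  · congr 2
    apply List.map_congr_left
    intro s hs
    have hs' : s < 2^m := by
      rw [List.mem_range'] at hs
      obtain ⟨i, hi, rfl⟩ := hs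
      omega
    rw [pvPairFold row m s mask hs']
    rfl
  · refine congrArg (fun o => Option.getD o 0) (pvOM_congr_mem _ ?_)
    intro s
    rw [List.mem_range', pvNeSubs_mem]
    constructor
    · rintro ⟨i, hi, rfl⟩
      exact ⟨1 + i, by omega, by omega, by ring⟩
    · rintro ⟨q, h1, hq, rfl⟩
      exact ⟨2^0*q - 1, by omega, by omega⟩

-- bottom-up layers of B = top-down dp of A, layer by layer
lemma pvLayers (c2 : List Int) (m : Nat) (rows : List (List Int)) :
    rows.foldr (pvStepB m)
        ((List.range (2^m)).map
          (fun mask => (List.range m).foldl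
            (fun tot j => if mask.testBit j then tot else tot + c2.getD j 0) 0))
      = (List.range (2^m)).map (fun mask => pvDpA c2 m rows mask) := by
  induction rows with
  | nil => rfl
  | cons row rest ih =>
    rw [List.foldr_cons, ih, pvStepB_spec m row (pvDpA c2 m rest)]
    apply List.map_congr_left
    intro mask _
    exact (pvDpA_cons c2 m row rest mask).symm

-- ===== VERDICT (by name: the statement is the Claim_ definition above) =====
theorem connectTwoGroups_dp_optimized_spec : Claim_equal_connectTwoGroups_dp_optimized := by
  intro cost _ _
  unfold Spec_connectTwoGroups_dp_optimized
  unfold connectTwoGroups_dp_optimized connectTwoGroups_dp_optimized_alt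
  dsimp only
  rw [pvLayers]
  rw [PySem.List.getD_map_range _ _ _ _ (Nat.two_pow_pos _)]
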